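-- pv_equiv track=rewrite | github.com/RashmithaBRamesh/video_format_classification | app.py | transmission
-- ===== SOURCE A (Python) =====
-- def transmission(gop):
--     result, buffer = [], []
--
--     for f in gop:
--         if f in ["I", "P"]:
--             result.append(f)
--             result.extend(buffer)
--             buffer = []
--         else:
--             buffer.append(f)
--
--     result.extend(buffer)
--     return result
-- ===== SOURCE B (Python) =====
-- def transmission(gop):
--     # Search-then-split: repeatedly find the next I/P frame, emit it followed
--     # by the non-I/P frames that preceded it; append leftovers at the end.
--     out = []
--     rest = list(gop)
--     while True:
--         i = next((k for k, f in enumerate(rest) if f in ("I", "P")), None)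
--         if i is None:
--             out.extend(rest)
--             return out
--         out.append(rest[i])
--         out.extend(rest[:i])
--         rest = rest[i + 1:]
-- ===== Notes on version B (the rewrite author's own statement) =====
-- stated objective: alternative
-- what changed: A makes one pass keeping a buffer accumulator that is flushed after each I/P frame; B instead repeatedly searches for the next I/P frame and splits the list there, emitting that frame followed by the preceding non-I/P run.
import Mathlib
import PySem

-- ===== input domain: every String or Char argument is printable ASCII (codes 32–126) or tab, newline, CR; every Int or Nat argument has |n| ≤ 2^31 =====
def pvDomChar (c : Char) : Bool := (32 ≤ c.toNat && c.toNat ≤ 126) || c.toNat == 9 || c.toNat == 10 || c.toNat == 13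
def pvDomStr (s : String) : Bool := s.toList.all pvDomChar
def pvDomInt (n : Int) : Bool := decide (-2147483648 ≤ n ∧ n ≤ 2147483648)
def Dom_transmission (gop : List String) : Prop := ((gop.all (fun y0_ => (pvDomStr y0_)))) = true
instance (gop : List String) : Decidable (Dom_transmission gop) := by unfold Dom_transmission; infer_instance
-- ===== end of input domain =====

-- B replaces A's single pass with a flushed buffer accumulator by a
-- search-then-split recursion on the position of the next I/P frame.

-- ===== PORT A =====
-- one pass; state = (result, buffer); buffer flushed after each I/P; final result.extend(buffer)
def transmission (gop : List String) : List String :=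
  let s := gop.foldl
    (fun (st : List String × List String) f =>
      if f = "I" ∨ f = "P" then (st.1 ++ [f] ++ st.2, [])
      else (st.1, st.2 ++ [f]))
    ([], [])
  s.1 ++ s.2

-- ===== PORT B =====
-- bound needed by transmission_alt's termination proof
theorem findIdx?_bound {α : Type} (p : α → Bool) (xs : List α) (i : Nat)
    (h : xs.findIdx? p = some i) : i < xs.length :=
  ((List.findIdx?_eq_some_iff_findIdx_eq.mp h)).1

-- search-then-split: find first I/P frame, emit it then the prefix, recurse on the remainder
def transmission_alt (gop : List String) : List String :=
  match h : gop.findIdx? (fun f => f == "I" || f == "P") with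
  | none => gop
  | some i =>
    gop.getD i "" :: (gop.take i ++ transmission_alt (gop.drop (i + 1)))
termination_by gop.length
decreasing_by
  have hi : i < gop.length := findIdx?_bound _ _ _ h
  simp [List.length_drop]; omega

-- ===== PRECONDITION & SPEC =====
def Spec_transmission (gop : List String) (out : List String) : Prop := out = transmission_alt gop
instance (gop : List String) (out : List String) : Decidable (Spec_transmission gop out) := by unfold Spec_transmission; infer_instance

-- ===== CLAIM (what is proved, stated in full; the proofs are below) =====
def Claim_equal_transmission : Prop := ∀ (gop : List String), Dom_transmission gop → Spec_transmission gop (transmission gop)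

-- ===== LEMMAS AND PROOFS =====

theorem findIdx?_no_match {α : Type} (p : α → Bool) (buf : List α) :
    (∀ x ∈ buf, p x = false) → buf.findIdx? p = none := by
  induction buf with
  | nil => intro _; rfl
  | cons a t ih =>
    intro hb
    have ha := hb a (by simp)
    rw [List.findIdx?_cons, ih (fun x hx => hb x (by simp [hx]))]
    simp [ha]

theorem findIdx?_buf_cons {α : Type} (p : α → Bool) (buf rest : List α) (f : α)
    (hf : p f = true) :
    (∀ x ∈ buf, p x = false) → (buf ++ f :: rest).findIdx? p = some buf.length := by
  induction buf with
  | nil => intro _; simp [List.findIdx?_cons, hf]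
  | cons a t ih =>
    intro hb
    have ha := hb a (by simp)
    rw [List.cons_append, List.findIdx?_cons, ih (fun x hx => hb x (by simp [hx]))]
    simp [ha]

theorem mem_to_false (x : String) (h : ¬(x = "I" ∨ x = "P")) :
    ((x == "I" || x == "P") : Bool) = false := by
  have h1 : x ≠ "I" := fun e => h (Or.inl e)
  have h2 : x ≠ "P" := fun e => h (Or.inr e)
  simp [h1, h2]

theorem alt_flush (buf rest : List String) (f : String)
    (hb : ∀ x ∈ buf, ¬(x = "I" ∨ x = "P")) (hf : f = "I" ∨ f = "P") :
    transmission_alt (buf ++ f :: rest) = f :: (buf ++ transmission_alt rest) := by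
  have hb' : ∀ x ∈ buf, ((x == "I" || x == "P") : Bool) = false :=
    fun x hx => mem_to_false x (hb x hx)
  have hf' : ((f == "I" || f == "P") : Bool) = true := by
    rcases hf with h | h <;> simp [h]
  have hfind := findIdx?_buf_cons (fun g => g == "I" || g == "P") buf rest f hf' hb'
  rw [transmission_alt]
  split
  · rename_i h; rw [hfind] at h; exact absurd h (by simp)
  · rename_i i h
    rw [hfind] at h
    injection h with h
    subst h
    have hget : (buf ++ f :: rest).getD buf.length "" = f := by
      simp [List.getD]
    have htake : (buf ++ f :: rest).take buf.length = buf := by simp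
    have hdrop : (buf ++ f :: rest).drop (buf.length + 1) = rest := by
      rw [List.drop_append]
      simp
    rw [hget, htake, hdrop]

theorem alt_no_ip (buf : List String)
    (hb : ∀ x ∈ buf, ¬(x = "I" ∨ x = "P")) :
    transmission_alt buf = buf := by
  have hb' : ∀ x ∈ buf, ((x == "I" || x == "P") : Bool) = false :=
    fun x hx => mem_to_false x (hb x hx)
  rw [transmission_alt]
  split
  · rfl
  · rename_i i h
    rw [findIdx?_no_match _ _ hb'] at h
    exact absurd h (by simp)

theorem loop_invariant (gop : List String) : ∀ (res buf : List String),
    (∀ x ∈ buf, ¬(x = "I" ∨ x = "P")) →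
    (let s := gop.foldl
      (fun (st : List String × List String) f =>
        if f = "I" ∨ f = "P" then (st.1 ++ [f] ++ st.2, [])
        else (st.1, st.2 ++ [f])) (res, buf)
     s.1 ++ s.2) = res ++ transmission_alt (buf ++ gop) := by
  induction gop with
  | nil =>
    intro res buf hb
    simp [alt_no_ip buf hb]
  | cons f rest ih =>
    intro res buf hb
    by_cases hf : f = "I" ∨ f = "P"
    · simp only [List.foldl_cons, if_pos hf]
      have := ih (res ++ [f] ++ buf) [] (by simp)
      simp only [List.nil_append] at this
      rw [show ((res ++ [f] ++ buf, ([] : List String)) : List String × List String)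
            = (res ++ [f] ++ buf, []) from rfl]
      rw [this, alt_flush buf rest f hb hf]
      simp
    · simp only [List.foldl_cons, if_neg hf]
      have := ih res (buf ++ [f]) (by
        intro x hx
        rcases List.mem_append.mp hx with h | h
        · exact hb x h
        · simp at h; subst h; exact hf)
      rw [this]
      simp

-- ===== VERDICT (by name: the statement is the Claim_ definition above) =====
theorem transmission_spec : Claim_equal_transmission := by
  intro gop _
  unfold Spec_transmission transmission
  have := loop_invariant gop [] [] (by simp)
  simpa using this
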